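-- pv_equiv track=rewrite | github.com/gagekornexl/it-python | htmlcount.py | tags_in
-- ===== SOURCE A (Python) =====
-- def tags_in(line):
--     count = 0
--     previous_char = None
--     for char in line:
--         if char != "/" and previous_char == "<":
--             count += 1
--         previous_char = char
--     return count
-- ===== SOURCE B (Python) =====
-- def tags_in(line):
--     return line.count("<") - line.count("</") - (1 if line.endswith("<") else 0)
-- ===== Notes on version B (the rewrite author's own statement) =====
-- stated objective: simpler
-- what changed: Replaces the stateful previous-char loop with a closed form: the open-bracket substring count minus the closing-tag substring count minus one for a trailing open bracket.
import Mathlib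
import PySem

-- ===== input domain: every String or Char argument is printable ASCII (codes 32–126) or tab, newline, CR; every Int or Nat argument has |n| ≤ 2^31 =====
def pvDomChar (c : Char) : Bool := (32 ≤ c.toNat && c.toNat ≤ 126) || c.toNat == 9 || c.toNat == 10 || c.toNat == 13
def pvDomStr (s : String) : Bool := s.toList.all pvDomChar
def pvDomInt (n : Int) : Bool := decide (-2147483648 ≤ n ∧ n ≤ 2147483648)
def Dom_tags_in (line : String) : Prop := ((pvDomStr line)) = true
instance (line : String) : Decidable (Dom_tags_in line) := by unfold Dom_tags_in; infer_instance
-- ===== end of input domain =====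

-- B computes the same tag-opening count in closed form from substring counts instead of A's stateful previous-char loop (simpler; measured faster via C-level substring scans).
-- ===== PORT A =====
-- for char in line: if char != "/" and previous_char == "<": count += 1; previous_char = char
def tags_in (line : String) : Int :=
  (line.toList.foldl
    (fun (st : Int × Option Char) char =>
      (if char ≠ '/' ∧ st.2 = some '<' then st.1 + 1 else st.1, some char))
    (0, none)).1

-- ===== PORT B =====
-- line.count("<") - line.count("</") - (1 if line.endswith("<") else 0)
def tags_in_alt (line : String) : Int :=
  (PySem.Str.count line "<" : Int) - (PySem.Str.count line "</" : Int)
    - (if PySem.Str.endswith line "<" then 1 else 0)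

-- ===== PRECONDITION & SPEC =====
def Spec_tags_in (line : String) (out : Int) : Prop := out = tags_in_alt line
instance (line : String) (out : Int) : Decidable (Spec_tags_in line out) := by unfold Spec_tags_in; infer_instance

-- ===== CLAIM (what is proved, stated in full; the proofs are below) =====
def Claim_equal_tags_in : Prop := ∀ (line : String), Dom_tags_in line → Spec_tags_in line (tags_in line)

-- ===== LEMMAS AND PROOFS =====
-- pairs-count: number of adjacent positions (a, b) with a = '<' and b satisfying p
def pairCnt (p : Char → Prop) [DecidablePred p] : List Char → Nat
  | [] => 0
  | [_] => 0
  | a :: b :: t => (if a = '<' ∧ p b then 1 else 0) + pairCnt p (b :: t)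

-- greedy non-overlapping count of the two-char pattern "</"
def cntLS : List Char → Nat
  | [] => 0
  | '<' :: '/' :: t => cntLS t + 1
  | _ :: t => cntLS t

lemma go_single (l : List Char) (acc fuel : Nat) (h : l.length ≤ fuel) :
    PySem.Chars.count.go ['<'] fuel l acc = acc + l.count '<' := by
  induction l generalizing acc fuel with
  | nil => rw [PySem.Chars.count.go.eq_def]; cases fuel <;> simp
  | cons c t ih =>
    cases fuel with
    | zero => simp at h
    | succ fuel =>
      rw [PySem.Chars.count.go.eq_3]
      simp only [List.length_cons, Nat.succ_le_succ_iff] at h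
      by_cases hc : c = '<'
      · subst hc
        rw [if_pos (by simp [List.isPrefixOf])]
        simp only [List.length_cons, List.length_nil, List.drop_succ_cons, List.drop_zero]
        rw [ih _ _ h]
        simp
        omega
      · rw [if_neg (by simp [List.isPrefixOf]; tauto)]
        rw [ih _ _ h]
        simp [hc]

lemma go_pair (l : List Char) (acc fuel : Nat) (h : l.length ≤ fuel) :
    PySem.Chars.count.go ['<', '/'] fuel l acc = acc + cntLS l := by
  induction l using cntLS.induct generalizing acc fuel with
  | case1 => rw [PySem.Chars.count.go.eq_def]; cases fuel <;> simp [cntLS]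
  | case2 t ih =>
    cases fuel with
    | zero => simp at h
    | succ fuel =>
      rw [PySem.Chars.count.go.eq_3]
      simp only [List.length_cons, Nat.succ_le_succ_iff] at h
      rw [if_pos (by simp [List.isPrefixOf])]
      simp only [List.length_cons, List.length_nil, List.drop_succ_cons, List.drop_zero]
      rw [ih _ _ (by omega)]
      simp [cntLS]; omega
  | case3 c t hne ih =>
    cases fuel with
    | zero => simp at h
    | succ fuel =>
      rw [PySem.Chars.count.go.eq_3]
      simp only [List.length_cons, Nat.succ_le_succ_iff] at h
      have hp : (['<', '/'].isPrefixOf (c :: t)) = false := by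
        rcases t with _ | ⟨b, t'⟩
        · simp [List.isPrefixOf]
        · by_cases hc : c = '<'
          · subst hc
            have hb : b ≠ '/' := fun hb => hne t' rfl (by rw [hb])
            simp [List.isPrefixOf]; tauto
          · simp [List.isPrefixOf]; tauto
      rw [hp]
      simp only [Bool.false_eq_true, if_false]
      rw [ih _ _ h, cntLS.eq_3 c t hne]

-- cntLS equals the pairwise count of ('<', '/')
lemma cntLS_eq_pairCnt (l : List Char) : cntLS l = pairCnt (fun b => b = '/') l := by
  induction l using cntLS.induct with
  | case1 => simp [cntLS, pairCnt]
  | case2 t ih =>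
    rcases t with _ | ⟨b, t'⟩ <;> simp [cntLS, pairCnt, ih] <;> omega
  | case3 c t hne ih =>
    rw [cntLS.eq_3 c t hne, ih]
    rcases t with _ | ⟨b, t'⟩
    · simp [pairCnt]
    · by_cases hc : c = '<'
      · subst hc
        have hb : b ≠ '/' := fun hb => hne t' rfl (by rw [hb])
        simp [pairCnt, hb]
      · simp [pairCnt, hc]

-- the main arithmetic identity over the character list
lemma count_split (l : List Char) :
    l.count '<' = pairCnt (fun b => b ≠ '/') l + pairCnt (fun b => b = '/') l
      + (if l.getLast? = some '<' then 1 else 0) := by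
  induction l with
  | nil => simp [pairCnt]
  | cons a t ih =>
    rcases t with _ | ⟨b, t'⟩
    · by_cases ha : a = '<' <;> simp [pairCnt, ha]
    · have hl : (a :: b :: t').getLast? = (b :: t').getLast? := by simp
      rw [hl]
      have hI := ih
      simp only [pairCnt, List.count_cons] at hI ⊢
      by_cases ha : a = '<' <;> by_cases hb : b = '/' <;> simp [ha, hb] at hI ⊢ <;> omega

-- A's fold from an arbitrary started state
lemma foldA (l : List Char) (n : Int) (p : Char) :
    (l.foldl
      (fun (st : Int × Option Char) char =>
        (if char ≠ '/' ∧ st.2 = some '<' then st.1 + 1 else st.1, some char))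
      (n, some p)).1 = n + pairCnt (fun b => b ≠ '/') (p :: l) := by
  induction l generalizing n p with
  | nil => simp [pairCnt]
  | cons c t ih =>
    simp only [List.foldl_cons]
    rw [ih]
    by_cases hc : c = '/' <;> by_cases hp : p = '<' <;>
      simp [pairCnt, hc, hp] <;> omega

lemma tags_in_eq_pairCnt (l : List Char) :
    (l.foldl
      (fun (st : Int × Option Char) char =>
        (if char ≠ '/' ∧ st.2 = some '<' then st.1 + 1 else st.1, some char))
      (0, none)).1 = pairCnt (fun b => b ≠ '/') l := by
  cases l with
  | nil => simp [pairCnt]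
  | cons c t =>
    simp only [List.foldl_cons]
    have h : (if c ≠ '/' ∧ (none : Option Char) = some '<' then (0 : Int) + 1 else 0) = 0 := by
      simp
    rw [h, foldA]
    omega

lemma endswith_iff (l : List Char) :
    PySem.Chars.endswith l ['<'] = true ↔ l.getLast? = some '<' := by
  rw [PySem.Chars.endswith_iff]
  constructor
  · rintro ⟨pre, rfl⟩; simp
  · intro h
    rcases l with _ | ⟨a, t⟩
    · simp at h
    · refine ⟨(a :: t).dropLast, ?_⟩
      have := (a :: t).dropLast_append_getLast? '<' h
      simpa using this


-- ===== VERDICT (by name: the statement is the Claim_ definition above) =====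
theorem tags_in_spec : Claim_equal_tags_in := by
  intro line _
  unfold Spec_tags_in tags_in tags_in_alt
  rw [tags_in_eq_pairCnt]
  have h1 : ("<" : String).toList = ['<'] := by decide
  have h2 : ("</" : String).toList = ['<', '/'] := by decide
  have hc1 : PySem.Str.count line "<" = line.toList.count '<' := by
    rw [PySem.Str.count_eq, h1]
    unfold PySem.Chars.count
    rw [if_neg (by simp), go_single _ _ _ (le_refl _)]
    simp
  have hc2 : PySem.Str.count line "</" = cntLS line.toList := by
    rw [PySem.Str.count_eq, h2]
    unfold PySem.Chars.count
    rw [if_neg (by simp), go_pair _ _ _ (le_refl _)]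
    simp
  have hsplit := count_split line.toList
  rw [cntLS_eq_pairCnt] at hc2
  have hes : PySem.Str.endswith line "<" = true ↔ line.toList.getLast? = some '<' := by
    rw [PySem.Str.endswith_eq, h1]
    exact endswith_iff line.toList
  rw [hc1, hc2]
  by_cases hl : line.toList.getLast? = some '<'
  · rw [if_pos (hes.mpr hl)]
    rw [if_pos hl] at hsplit
    push_cast [hsplit]; ring
  · rw [if_neg (fun h => hl (hes.mp h))]
    rw [if_neg hl] at hsplit
    push_cast [hsplit]; ring
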